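-- pv_equiv track=rewrite | github.com/danion19/iec60870_5_configurator | support_functions.py | ioa_to_address
-- ===== SOURCE A (Python) =====
-- def ioa_to_address(ioa):
--     s = 0
--     k = 0
--     h = 0
--     address = []
--     while True:
--         if ((256 * 256) * h + 256 * k + s) == ioa:
--             address.append(h)
--             address.append(k)
--             address.append(s)
--             break
--         else:
--             s = (s + 1) % 256
--             if s == 0:
--                 k = (k + 1) % 256
--                 if k == 0:
--                     h += 1 % 256
--
--     return address
-- ===== SOURCE B (Python) =====
-- def ioa_to_address(ioa):
--     q, s = divmod(ioa, 256)
--     h, k = divmod(q, 256)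
--     return [h, k, s]
-- ===== Notes on version B (the rewrite author's own statement) =====
-- stated objective: faster
-- what changed: Replaces A's incremental counting search (stepping s,k,h one unit at a time until they reconstruct ioa) with direct base-256 digit extraction via two divmods.
import Mathlib
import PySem

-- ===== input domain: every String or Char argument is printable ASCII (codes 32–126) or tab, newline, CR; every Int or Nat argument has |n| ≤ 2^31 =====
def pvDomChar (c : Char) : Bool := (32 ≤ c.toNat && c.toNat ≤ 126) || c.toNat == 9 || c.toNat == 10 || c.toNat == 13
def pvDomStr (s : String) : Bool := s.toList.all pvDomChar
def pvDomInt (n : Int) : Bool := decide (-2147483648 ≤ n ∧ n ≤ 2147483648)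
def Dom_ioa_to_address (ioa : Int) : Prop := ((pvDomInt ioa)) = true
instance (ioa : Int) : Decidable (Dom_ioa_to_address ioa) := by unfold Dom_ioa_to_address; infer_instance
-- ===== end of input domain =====

-- B replaces A's O(ioa) incremental counting search with direct base-256 digit extraction (two divmods); equivalent for the nonnegative ioa on which A terminates.


-- ===== PORT A =====
-- A's while-True loop counts up from (s,k,h) = (0,0,0) until the digits reconstruct ioa.
-- The loop runs exactly ioa iterations when 0 ≤ ioa, so fuel ioa.toNat makes the same
-- computation total (fuel is only a totality guard; it is never exhausted inside Pre_).
def ioa_to_address_loop (ioa : Int) (fuel : Nat) (s k h : Int) : List Int :=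
  if 256 * 256 * h + 256 * k + s = ioa then
    [h, k, s]
  else
    match fuel with
    | 0 => []
    | f + 1 =>
      let s' := PySem.Int.mod (s + 1) 256
      if s' = 0 then
        let k' := PySem.Int.mod (k + 1) 256
        if k' = 0 then
          ioa_to_address_loop ioa f s' k' (h + 1)   -- h += 1 % 256  (i.e. h + 1)
        else
          ioa_to_address_loop ioa f s' k' h
      else
        ioa_to_address_loop ioa f s' k h

def ioa_to_address (ioa : Int) : List Int :=
  ioa_to_address_loop ioa ioa.toNat 0 0 0

-- ===== PORT B =====
def ioa_to_address_alt (ioa : Int) : List Int :=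
  let q := PySem.Int.floordiv ioa 256
  let s := PySem.Int.mod ioa 256
  let h := PySem.Int.floordiv q 256
  let k := PySem.Int.mod q 256
  [h, k, s]

-- ===== PRECONDITION & SPEC =====
-- A's loop never terminates for negative ioa (the reconstructed value only counts upward from 0).
def Pre_ioa_to_address (ioa : Int) : Prop := 0 ≤ ioa
instance (ioa : Int) : Decidable (Pre_ioa_to_address ioa) := by unfold Pre_ioa_to_address; infer_instance
def pvWitness_ioa_to_address : Int := (70000)

def Spec_ioa_to_address (ioa : Int) (out : List Int) : Prop := out = ioa_to_address_alt ioa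
instance (ioa : Int) (out : List Int) : Decidable (Spec_ioa_to_address ioa out) := by unfold Spec_ioa_to_address; infer_instance

-- ===== CLAIM (what is proved, stated in full; the proofs are below) =====
def Claim_equal_ioa_to_address : Prop := ∀ (ioa : Int), Dom_ioa_to_address ioa → Pre_ioa_to_address ioa → Spec_ioa_to_address ioa (ioa_to_address ioa)

-- ===== LEMMAS AND PROOFS =====

-- Loop invariant: if (s,k,h) are the base-256 digits of a counter n ≤ ioa and enough fuel
-- remains, the loop returns the base-256 digits of ioa.
theorem ioa_loop_inv (ioa : Int) (fuel : Nat) :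
    ∀ n : Int, 0 ≤ n → n ≤ ioa → ioa ≤ n + fuel →
      ioa_to_address_loop ioa fuel (n % 256) (n / 256 % 256) (n / 65536)
        = [ioa / 65536, ioa / 256 % 256, ioa % 256] := by
  induction fuel with
  | zero =>
    intro n hn h1 h2
    have hEq : n = ioa := by omega
    subst hEq
    rw [ioa_to_address_loop,
      if_pos (show 256 * 256 * (n / 65536) + 256 * (n / 256 % 256) + n % 256 = n by omega)]
  | succ f ih =>
    intro n hn h1 h2
    rw [ioa_to_address_loop]
    by_cases hc : 256 * 256 * (n / 65536) + 256 * (n / 256 % 256) + n % 256 = ioa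
    · have hEq : n = ioa := by omega
      subst hEq
      rw [if_pos hc]
    · have hlt : n < ioa := by omega
      rw [if_neg hc]
      simp only [PySem.Int.mod_eq_emod_of_pos (show (0:Int) < 256 by norm_num)]
      have hs : (n % 256 + 1) % 256 = (n + 1) % 256 := by omega
      rw [hs]
      by_cases hz : (n + 1) % 256 = 0
      · rw [if_pos hz]
        have hk : (n / 256 % 256 + 1) % 256 = (n + 1) / 256 % 256 := by omega
        rw [hk]
        by_cases hz2 : (n + 1) / 256 % 256 = 0
        · rw [if_pos hz2]
          have hh : n / 65536 + 1 = (n + 1) / 65536 := by omega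
          rw [hh]
          exact ih (n + 1) (by omega) (by omega) (by omega)
        · rw [if_neg hz2]
          have hh : n / 65536 = (n + 1) / 65536 := by omega
          rw [hh]
          exact ih (n + 1) (by omega) (by omega) (by omega)
      · rw [if_neg hz]
        have hk : n / 256 % 256 = (n + 1) / 256 % 256 := by omega
        have hh : n / 65536 = (n + 1) / 65536 := by omega
        rw [hk, hh]
        exact ih (n + 1) (by omega) (by omega) (by omega)

-- ===== VERDICT (by name: the statement is the Claim_ definition above) =====
theorem ioa_to_address_spec : Claim_equal_ioa_to_address := by
  intro ioa _ hpre
  unfold Spec_ioa_to_address ioa_to_address ioa_to_address_alt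
  simp only [PySem.Int.mod_eq_emod_of_pos (show (0:Int) < 256 by norm_num),
    PySem.Int.floordiv_eq_ediv_of_pos (show (0:Int) < 256 by norm_num)]
  have h0 := ioa_loop_inv ioa ioa.toNat 0 le_rfl hpre (by omega)
  simp only [Int.zero_emod, Int.zero_ediv] at h0
  rw [h0]
  have : ioa / 256 / 256 = ioa / 65536 := by omega
  rw [this]
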